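-- pv_equiv track=rewrite | github.com/AndanteKim/LeetCode_Practice | 1133-largest-unique-number/1133-largest-unique-number.py | largestUniqueNumber
-- ===== SOURCE A (Python) =====
-- from typing import List
--
-- def largestUniqueNumber(nums: List[int]) -> int:
--     ans, freq = -1, dict()
--
--     for x in nums:
--         freq[x] = freq.get(x, 0) + 1
--
--     for key, val in freq.items():
--         if val == 1 and key > ans:
--             ans = key
--
--     return ans
-- ===== SOURCE B (Python) =====
-- def largestUniqueNumber(nums):
--     s = sorted(nums)
--     n = len(s)
--     prev = None  # element just scanned (the right neighbor in sorted order)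
--     for i in range(n - 1, -1, -1):
--         x = s[i]
--         if prev != x and (i == 0 or s[i - 1] != x):
--             return x
--         prev = x
--     return -1
-- ===== Notes on version B (the rewrite author's own statement) =====
-- stated objective: alternative
-- what changed: Replaces A's frequency dictionary plus a scan over its items by a single backwards scan of sorted(nums) that returns the first element differing from both sorted neighbors; no hash map is maintained.
-- intended difference: On inputs that have a unique element but whose unique elements are all < -1, A's 'key > ans' test against the sentinel -1 makes A return -1, while B returns the actual largest unique element, the intended answer to 'largest number appearing exactly once'. — e.g. on largestUniqueNumber([-5, -3, -3]): A returns -1, B returns -5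
import Mathlib
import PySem

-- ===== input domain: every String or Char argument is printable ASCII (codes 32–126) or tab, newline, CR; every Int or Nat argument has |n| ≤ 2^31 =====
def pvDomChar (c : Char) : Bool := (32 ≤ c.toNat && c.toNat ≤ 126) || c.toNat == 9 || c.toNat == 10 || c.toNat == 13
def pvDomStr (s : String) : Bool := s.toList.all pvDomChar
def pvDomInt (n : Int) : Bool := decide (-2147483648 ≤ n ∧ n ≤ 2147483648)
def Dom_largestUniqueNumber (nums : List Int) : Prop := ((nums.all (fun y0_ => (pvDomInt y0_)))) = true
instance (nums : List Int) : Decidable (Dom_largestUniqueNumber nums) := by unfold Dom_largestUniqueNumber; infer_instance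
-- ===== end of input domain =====

-- B replaces A's frequency dictionary by a scan of sorted(nums) from the largest element down
-- (alternative decomposition); B intentionally returns the largest unique element even when it is < -1,
-- where A's 'key > ans' guard with sentinel -1 drops it.


-- ===== PORT A =====
def largestUniqueNumber (nums : List Int) : Int :=
  -- ans, freq = -1, dict(); for x in nums: freq[x] = freq.get(x, 0) + 1
  let freq : PySem.Dict Int Int :=
    nums.foldl (fun d x => d.insert x (d.getD x 0 + 1)) PySem.Dict.empty
  -- for key, val in freq.items(): if val == 1 and key > ans: ans = key
  freq.items.foldl (fun ans kv => if kv.2 = 1 ∧ kv.1 > ans then kv.1 else ans) (-1)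

-- ===== PORT B =====
-- the backwards 'for i in range(n-1,-1,-1)' with early return: recursion over the reversed
-- sorted list, carrying 'prev' (the right sorted neighbor); rest.head? is s[i-1].
def lunAltGo : Option Int → List Int → Int
  | _, [] => -1
  | prev, x :: rest =>
      if prev ≠ some x ∧ rest.head? ≠ some x then x else lunAltGo (some x) rest

def largestUniqueNumber_alt (nums : List Int) : Int :=
  lunAltGo none (PySem.List.sorted nums (fun y => y) false).reverse

-- ===== PRECONDITION & SPEC =====
-- On inputs whose unique elements all lie below -1 (and at least one unique element exists), A's
-- 'key > ans' test against the sentinel -1 makes A return -1, while B returns the actual largest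
-- unique element, which is the intended answer to "largest number that appears exactly once".
def D_largestUniqueNumber (nums : List Int) : Prop :=
  (∃ x ∈ nums, nums.count x = 1) ∧ (∀ x ∈ nums, nums.count x = 1 → x < -1)
instance (nums : List Int) : Decidable (D_largestUniqueNumber nums) := by
  unfold D_largestUniqueNumber; infer_instance

def Spec_largestUniqueNumber (nums : List Int) (out : Int) : Prop :=
  ¬ D_largestUniqueNumber nums → out = largestUniqueNumber_alt nums
instance (nums : List Int) (out : Int) : Decidable (Spec_largestUniqueNumber nums out) := by
  unfold Spec_largestUniqueNumber; infer_instance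

def pvDiffWitness_largestUniqueNumber : List Int := [-5, -3, -3]
def pvDiffWitnessOut_largestUniqueNumber : Int × Int := (-1, -5)

-- ===== CLAIM =====
def Claim_unchanged_largestUniqueNumber : Prop := ∀ (nums : List Int), Dom_largestUniqueNumber nums → Spec_largestUniqueNumber nums (largestUniqueNumber nums)
def Claim_changed_largestUniqueNumber : Prop := Dom_largestUniqueNumber (pvDiffWitness_largestUniqueNumber) ∧ D_largestUniqueNumber (pvDiffWitness_largestUniqueNumber) ∧ largestUniqueNumber (pvDiffWitness_largestUniqueNumber) = pvDiffWitnessOut_largestUniqueNumber.1 ∧ largestUniqueNumber_alt (pvDiffWitness_largestUniqueNumber) = pvDiffWitnessOut_largestUniqueNumber.2 ∧ pvDiffWitnessOut_largestUniqueNumber.1 ≠ pvDiffWitnessOut_largestUniqueNumber.2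
def Claim_exact_largestUniqueNumber : Prop := ∀ (nums : List Int), Dom_largestUniqueNumber nums → D_largestUniqueNumber nums → largestUniqueNumber nums ≠ largestUniqueNumber_alt nums

-- ===== LEMMAS AND PROOFS =====

-- F nums: the unique values of nums, in strictly descending order (as they occur in reversed sorted nums)
def lunF (nums : List Int) : List Int :=
  ((PySem.List.sorted nums (fun y => y) false).reverse).filter (fun x => nums.count x == 1)

theorem lunF_perm_sorted (nums : List Int) :
    ((PySem.List.sorted nums (fun y => y) false).reverse).Perm nums :=
  (List.reverse_perm _).trans (PySem.List.sorted_perm nums (fun y => y) false)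

-- in a (· ≥ ·)-pairwise list pre, every element is ≥ the last one
theorem lun_ge_getLast (pre : List Int) (p : Int) (h : pre.Pairwise (· ≥ ·))
    (hl : pre.getLast? = some p) : ∀ y ∈ pre, y ≥ p := by
  intro y hy
  have h2 : pre.reverse.Pairwise (· ≤ ·) := by rw [List.pairwise_reverse]; exact h
  have h3 : pre.reverse.head? = some p := by rw [List.head?_reverse]; exact hl
  rcases hr : pre.reverse with _ | ⟨a, t⟩
  · simp [hr] at h3
  · rw [hr] at h3 h2
    simp only [List.head?_cons, Option.some.injEq] at h3
    have hy' : y ∈ a :: t := by rw [← hr]; simpa using hy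
    rcases List.mem_cons.mp hy' with rfl | ht
    · omega
    · have := List.rel_of_pairwise_cons h2 ht; omega

-- counting characterization: in a descending list pre ++ x :: rest, x occurs exactly once
-- iff neither the last of pre nor the head of rest equals x
theorem lun_count_one_iff (pre rest : List Int) (x : Int)
    (h : (pre ++ x :: rest).Pairwise (· ≥ ·)) :
    ((pre ++ x :: rest).count x = 1 ↔ (pre.getLast? ≠ some x ∧ rest.head? ≠ some x)) := by
  have hdec : List.Pairwise (· ≥ ·) pre := (List.pairwise_append.mp h).1
  have hrest : List.Pairwise (· ≥ ·) (x :: rest) := (List.pairwise_append.mp h).2.1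
  have hcross : ∀ y ∈ pre, y ≥ x := fun y hy =>
    (List.pairwise_append.mp h).2.2 y hy x (by simp)
  have hcount : (pre ++ x :: rest).count x = pre.count x + 1 + rest.count x := by
    simp [List.count_append, List.count_cons_self]; omega
  have hpre : pre.count x = 0 ↔ pre.getLast? ≠ some x := by
    constructor
    · intro h0 hlast
      have : x ∈ pre := List.mem_of_getLast? hlast
      exact absurd (List.count_pos_iff.mpr this) (by omega)
    · intro hne
      rcases hp : pre.getLast? with _ | p
      · have : pre = [] := List.getLast?_eq_none_iff.mp hp
        simp [this]
      · refine List.count_eq_zero.mpr (fun hx => ?_)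
        have hge := lun_ge_getLast pre p hdec hp x hx
        have hpx : p ≥ x := by
          have : p ∈ pre := List.mem_of_getLast? hp
          exact hcross p this
        have : p ≠ x := by rw [hp] at hne; simpa using hne
        omega
  have hre : rest.count x = 0 ↔ rest.head? ≠ some x := by
    constructor
    · intro h0 hhead
      have : x ∈ rest := List.mem_of_mem_head? hhead
      exact absurd (List.count_pos_iff.mpr this) (by omega)
    · intro hne
      rcases rest with _ | ⟨hd, t⟩
      · simp
      · have hne' : hd ≠ x := by simpa [eq_comm] using hne
        have hhd : x ≥ hd := (List.pairwise_cons.mp hrest).1 hd (by simp)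
        have hall : ∀ y ∈ t, hd ≥ y := (List.pairwise_cons.mp ((List.pairwise_cons.mp hrest).2)).1
        refine List.count_eq_zero.mpr (fun hx => ?_)
        rcases List.mem_cons.mp hx with rfl | hx'
        · exact hne' rfl
        · have := hall x hx'
          omega
  constructor
  · intro h1
    have hp0 : pre.count x = 0 := by omega
    have hr0 : rest.count x = 0 := by omega
    exact ⟨hpre.mp hp0, hre.mp hr0⟩
  · rintro ⟨h1, h2⟩
    have := hpre.mpr h1
    have := hre.mpr h2
    omega

-- the scan returns the first element of the suffix that is unique in the whole descending list
theorem lunAltGo_spec (r : List Int) : ∀ pre : List Int,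
    (pre ++ r).Pairwise (· ≥ ·) →
    lunAltGo pre.getLast? r =
      ((r.filter (fun x => (pre ++ r).count x == 1)).head?).getD (-1) := by
  induction r with
  | nil => intro pre _; simp [lunAltGo]
  | cons x rest ih =>
    intro pre h
    by_cases hc : pre.getLast? ≠ some x ∧ rest.head? ≠ some x
    · have h1 : (pre ++ x :: rest).count x = 1 := (lun_count_one_iff pre rest x h).mpr hc
      have hb : ((pre ++ x :: rest).count x == 1) = true := beq_iff_eq.mpr h1
      simp only [lunAltGo, if_pos hc, List.filter_cons, hb, if_true, List.head?_cons,
        Option.getD_some]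
    · have h1 : (pre ++ x :: rest).count x ≠ 1 := fun h1 =>
        hc ((lun_count_one_iff pre rest x h).mp h1)
      have hgo : lunAltGo pre.getLast? (x :: rest) = lunAltGo (some x) rest := by
        simp only [lunAltGo]; rw [if_neg hc]
      have hlast : (pre ++ [x]).getLast? = some x := by simp
      have happ : (pre ++ [x]) ++ rest = pre ++ x :: rest := by simp
      have := ih (pre ++ [x]) (by rw [happ]; exact h)
      rw [hlast, happ] at this
      have hb : ((pre ++ x :: rest).count x == 1) = false := by
        simpa using h1
      rw [hgo, this, List.filter_cons]
      simp only [hb, if_false, Bool.false_eq_true]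

-- B computes the head of lunF (or -1)
theorem lun_alt_eq (nums : List Int) :
    largestUniqueNumber_alt nums = ((lunF nums).head?).getD (-1) := by
  have hperm := lunF_perm_sorted nums
  have hpw : ((PySem.List.sorted nums (fun y => y) false).reverse).Pairwise (· ≥ ·) := by
    rw [List.pairwise_reverse]
    simpa using PySem.List.sorted_pairwise nums (fun y => y)
  have := lunAltGo_spec ((PySem.List.sorted nums (fun y => y) false).reverse) [] (by simpa using hpw)
  simp only [List.nil_append, List.getLast?_nil] at this
  rw [largestUniqueNumber_alt, this, lunF]
  congr 2
  apply List.filter_congr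
  intro x _
  simp [hperm.count_eq]

-- A computes foldl max (-1) over the distinct unique keys
theorem lun_a_eq (nums : List Int) :
    largestUniqueNumber nums =
      (((PySem.Set.ofList nums).filter (fun k => nums.count k == 1)).foldl max (-1)) := by
  rw [largestUniqueNumber]
  simp only [PySem.Dict.foldl_insert_getD_add_one_eq_counter, PySem.Dict.items_counter]
  rw [List.foldl_map]
  simp only
  have hstep : ∀ (ans : Int), ∀ k ∈ PySem.Set.ofList nums,
      (if ((nums.count k : Int) = 1 ∧ k > ans) then k else ans) =
      (if (nums.count k == 1 : Bool) then max ans k else ans) := by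
    intro ans k _
    by_cases h1 : nums.count k = 1 <;> by_cases h2 : k > ans <;>
      simp [h1, h2] <;> omega
  have h1 := PySem.List.foldl_congr_mem
    (l := PySem.Set.ofList nums) (init := (-1 : Int))
    (f := fun ans k => if ((nums.count k : Int) = 1 ∧ k > ans) then k else ans)
    (g := fun ans k => if (nums.count k == 1 : Bool) then max ans k else ans)
    (fun acc x hx => hstep acc x hx)
  rw [h1, PySem.List.foldl_if_eq_foldl_filter]

-- lunF is strictly descending
theorem lunF_pairwise (nums : List Int) : (lunF nums).Pairwise (· > ·) := by
  have hpw : ((PySem.List.sorted nums (fun y => y) false).reverse).Pairwise (· ≥ ·) := by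
    rw [List.pairwise_reverse]
    simpa using PySem.List.sorted_pairwise nums (fun y => y)
  have hF : (lunF nums).Pairwise (· ≥ ·) := List.Pairwise.filter _ hpw
  have hnd : (lunF nums).Nodup := by
    rw [List.nodup_iff_count_le_one]
    intro a
    by_cases ha : a ∈ lunF nums
    · have h1 : nums.count a = 1 := by
        have := (List.mem_filter.mp ha).2
        simpa using this
      calc (lunF nums).count a ≤ ((PySem.List.sorted nums (fun y => y) false).reverse).count a :=
              (List.filter_sublist (p := fun x => nums.count x == 1)).count_le a
        _ = nums.count a := (lunF_perm_sorted nums).count_eq a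
        _ ≤ 1 := by omega
    · simp [List.count_eq_zero.mpr ha]
  have := List.Pairwise.and hF hnd
  exact this.imp (fun {a b} ⟨h1, h2⟩ => by omega)

theorem lunF_mem (nums : List Int) (x : Int) :
    x ∈ lunF nums ↔ x ∈ nums ∧ nums.count x = 1 := by
  rw [lunF, List.mem_filter]
  simp [List.mem_reverse, PySem.List.mem_sorted]

-- A's fold list is a permutation of lunF
theorem lun_a_eq_F (nums : List Int) :
    largestUniqueNumber nums = (lunF nums).foldl max (-1) := by
  rw [lun_a_eq]
  apply List.Perm.foldl_op_eq
  apply (List.perm_ext_iff_of_nodup ?_ ?_).mpr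
  · intro a
    rw [lunF_mem, List.mem_filter, PySem.Set.mem_ofList]
    simp
  · exact List.Nodup.filter _ (PySem.Set.nodup_ofList nums)
  · exact (lunF_pairwise nums).nodup

theorem lun_foldl_max_dominated (t : List Int) (a : Int) (h : ∀ y ∈ t, y ≤ a) :
    t.foldl max a = a := by
  rcases PySem.List.foldl_max_mem t a with heq | hmem
  · exact heq
  · have h1 := (PySem.List.le_foldl_max t a).1
    have h2 := h _ hmem
    omega

-- ===== VERDICT =====
theorem largestUniqueNumber_spec : Claim_unchanged_largestUniqueNumber := by
  intro nums _ hD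
  show largestUniqueNumber nums = largestUniqueNumber_alt nums
  rw [lun_a_eq_F, lun_alt_eq]
  rcases hF : lunF nums with _ | ⟨m, t⟩
  · simp
  · have hpw := lunF_pairwise nums
    rw [hF] at hpw
    have hlt : ∀ y ∈ t, y ≤ m := fun y hy => le_of_lt ((List.pairwise_cons.mp hpw).1 y hy)
    have hm : m ≥ -1 := by
      by_contra hm
      apply hD
      constructor
      · refine ⟨m, ?_⟩
        have := (lunF_mem nums m).mp (by rw [hF]; simp)
        exact ⟨this.1, this.2⟩
      · intro x hx hcx
        have hxF : x ∈ lunF nums := (lunF_mem nums x).mpr ⟨hx, hcx⟩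
        rw [hF] at hxF
        rcases List.mem_cons.mp hxF with rfl | hxt
        · omega
        · have := hlt x hxt; omega
    have : max (-1) m = m := by omega
    simp only [List.foldl_cons, List.head?_cons, Option.getD_some, this]
    exact lun_foldl_max_dominated t m hlt

theorem largestUniqueNumber_changed : Claim_changed_largestUniqueNumber := by
  unfold Claim_changed_largestUniqueNumber; decide

theorem largestUniqueNumber_tight : Claim_exact_largestUniqueNumber := by
  intro nums _ hD
  rw [lun_a_eq_F, lun_alt_eq]
  rcases hD with ⟨⟨x, hx, hcx⟩, hall⟩
  have hxF : x ∈ lunF nums := (lunF_mem nums x).mpr ⟨hx, hcx⟩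
  rcases hF : lunF nums with _ | ⟨m, t⟩
  · rw [hF] at hxF; simp at hxF
  · have hpw := lunF_pairwise nums
    rw [hF] at hpw
    have hlt : ∀ y ∈ t, y ≤ m := fun y hy => le_of_lt ((List.pairwise_cons.mp hpw).1 y hy)
    have hmF : m ∈ lunF nums := by rw [hF]; simp
    have hm' := (lunF_mem nums m).mp hmF
    have hm : m < -1 := hall m hm'.1 hm'.2
    have hfold : (m :: t).foldl max (-1) = -1 := by
      simp only [List.foldl_cons]
      have : max (-1) m = -1 := by omega
      rw [this]
      exact lun_foldl_max_dominated t (-1) (fun y hy => by have := hlt y hy; omega)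
    rw [hfold]
    simp only [List.head?_cons, Option.getD_some]
    omega
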